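-- pv_equiv track=rewrite | github.com/MaximeLagrange/Muograph | muograph/plotting/Plotting.py | get_nrows
-- ===== SOURCE A (Python) =====
-- from typing import Dict, List, Union, Tuple, Optional
--
-- def get_nrows(nplots:int,
--               ncols:int) -> Tuple[int]:
--
--     if nplots%ncols==0:
--         nrows, extra=int(nplots/ncols),0
--     else:
--         for i in range(1,ncols):
--             if nplots%ncols==i: nrows, extra=int(nplots/ncols)+1,ncols-i
--     return nrows, extra
-- ===== SOURCE B (Python) =====
-- def get_nrows(nplots: int, ncols: int):
--     rem = nplots % ncols
--     if rem == 0: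
--         return int(nplots / ncols), 0
--     return int(nplots / ncols) + 1, ncols - rem
-- ===== Notes on version B (the rewrite author's own statement) =====
-- stated objective: faster
-- what changed: B computes rem = nplots % ncols once and returns the answer by a direct two-branch formula, removing A's range(1, ncols) linear search that merely re-derives the modulus.
import Mathlib
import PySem

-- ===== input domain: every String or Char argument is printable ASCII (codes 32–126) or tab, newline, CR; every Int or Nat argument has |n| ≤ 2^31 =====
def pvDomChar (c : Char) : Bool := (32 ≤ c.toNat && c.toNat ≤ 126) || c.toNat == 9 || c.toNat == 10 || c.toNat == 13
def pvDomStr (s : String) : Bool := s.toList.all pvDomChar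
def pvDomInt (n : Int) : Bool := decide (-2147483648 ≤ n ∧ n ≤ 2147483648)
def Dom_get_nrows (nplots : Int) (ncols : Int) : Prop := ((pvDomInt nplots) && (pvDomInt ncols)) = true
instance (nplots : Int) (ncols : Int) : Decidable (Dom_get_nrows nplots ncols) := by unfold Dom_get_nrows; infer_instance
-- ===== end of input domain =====

-- B replaces A's range(1, ncols) linear search (which only re-derives nplots % ncols)
-- by computing the remainder once and returning a direct two-branch formula; return values are identical on Pre_.

-- ===== PORT A =====
-- int(nplots/ncols) is truncation-toward-zero division; on Dom (|n| ≤ 2^31) the float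
-- quotient truncates exactly, so it is ported as Lean's Int.tdiv (T-division), exact here.
-- Outside Pre_ the Python raises (ZeroDivisionError at ncols = 0; UnboundLocalError when the
-- search loop never assigns); the `.getD (0, 0)` only fires on those excluded inputs.
def get_nrows (nplots : Int) (ncols : Int) : Int × Int :=
  if PySem.Int.mod nplots ncols = 0 then
    (Int.tdiv nplots ncols, 0)
  else
    ((PySem.List.pyRange 1 ncols 1).foldl
        (fun acc i =>
          if PySem.Int.mod nplots ncols = i then some (Int.tdiv nplots ncols + 1, ncols - i)
          else acc)
        none).getD (0, 0)

-- ===== PORT B =====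
def get_nrows_alt (nplots : Int) (ncols : Int) : Int × Int :=
  let rem := PySem.Int.mod nplots ncols
  if rem = 0 then (Int.tdiv nplots ncols, 0)
  else (Int.tdiv nplots ncols + 1, ncols - rem)

-- ===== PRECONDITION & SPEC =====
-- Pre_ excludes exactly the inputs where A raises: ncols = 0 (ZeroDivisionError) and
-- ncols < 0 with a nonzero remainder (the loop range(1, ncols) is empty, so nrows is
-- never assigned and the return raises UnboundLocalError).
def Pre_get_nrows (nplots : Int) (ncols : Int) : Prop :=
  ncols ≠ 0 ∧ (0 < ncols ∨ PySem.Int.mod nplots ncols = 0)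
instance (nplots : Int) (ncols : Int) : Decidable (Pre_get_nrows nplots ncols) := by
  unfold Pre_get_nrows; infer_instance
def pvWitness_get_nrows : Int × Int := (7, 3)

def Spec_get_nrows (nplots : Int) (ncols : Int) (out : Int × Int) : Prop := out = get_nrows_alt nplots ncols
instance (nplots : Int) (ncols : Int) (out : Int × Int) : Decidable (Spec_get_nrows nplots ncols out) := by unfold Spec_get_nrows; infer_instance

-- ===== CLAIM (what is proved, stated in full; the proofs are below) =====
def Claim_equal_get_nrows : Prop := ∀ (nplots : Int) (ncols : Int), Dom_get_nrows nplots ncols → Pre_get_nrows nplots ncols → Spec_get_nrows nplots ncols (get_nrows nplots ncols)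

-- ===== LEMMAS AND PROOFS =====

-- the search loop never fires when the remainder is not in the scanned list
lemma fold_not_mem (r q c : Int) (l : List Int) (acc : Option (Int × Int)) (h : r ∉ l) :
    l.foldl (fun acc i => if r = i then some (q + 1, c - i) else acc) acc = acc := by
  induction l generalizing acc with
  | nil => rfl
  | cons a l ih =>
    simp only [List.mem_cons, not_or] at h
    simp only [List.foldl_cons, if_neg (h.1)]
    exact ih _ h.2

-- whenever the remainder occurs in the scanned list, the loop ends holding (q+1, c-r)
lemma fold_mem (r q c : Int) (l : List Int) (acc : Option (Int × Int)) (h : r ∈ l) :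
    l.foldl (fun acc i => if r = i then some (q + 1, c - i) else acc) acc
      = some (q + 1, c - r) := by
  induction l generalizing acc with
  | nil => cases h
  | cons a l ih =>
    by_cases hmem : r ∈ l
    · simp only [List.foldl_cons]
      exact ih _ hmem
    · have hra : r = a := by
        rcases List.mem_cons.mp h with h | h
        · exact h
        · exact absurd h hmem
      subst hra
      simp only [List.foldl_cons, if_pos]
      exact fold_not_mem r q c l _ hmem

-- ===== VERDICT (by name: the statement is the Claim_ definition above) =====
theorem get_nrows_spec : Claim_equal_get_nrows := by
  intro nplots ncols _ hpre
  unfold Spec_get_nrows get_nrows get_nrows_alt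
  by_cases h0 : PySem.Int.mod nplots ncols = 0
  · simp [h0]
  · rcases hpre with ⟨hne, hpos | hmod⟩
    · have hemod : PySem.Int.mod nplots ncols = nplots % ncols :=
        PySem.Int.mod_eq_emod_of_pos hpos
      have h1 : 1 ≤ PySem.Int.mod nplots ncols := by
        have := Int.emod_nonneg nplots (by omega : ncols ≠ 0)
        omega
      have h2 : PySem.Int.mod nplots ncols < ncols := by
        have := Int.emod_lt_of_pos nplots hpos
        omega
      have hmem : PySem.Int.mod nplots ncols ∈ PySem.List.pyRange 1 ncols 1 :=
        (PySem.List.mem_pyRange_one).mpr ⟨h1, h2⟩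
      simp only [if_neg h0]
      rw [fold_mem (PySem.Int.mod nplots ncols) (Int.tdiv nplots ncols) ncols _ none hmem]
      rfl
    · exact absurd hmod h0
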